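-- pv_equiv track=rewrite | github.com/alexwambu/Yaw5c | main.py | parse_script_with_characters
-- ===== SOURCE A (Python) =====
-- def parse_script_with_characters(script: str):
--     """
--     Expect script lines like:
--       NARRATOR: The world was quiet.
--       ALICE: Hello there!
--       BOB: Hi.
--     Lines without ':' are appended to previous speaker.
--     Returns list of scenes: [{character, text}]
--     """
--     scenes = []
--     current = None
--     for raw in script.splitlines():
--         line = raw.strip()
--         if not line:
--             # treat blank line as scene separator
--             current = None
--             continue
--         if ":" in line:
--             name, text = line.split(":", 1)
--             name = name.strip().upper()
--             text = text.strip()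
--             current = {"character": name, "text": text}
--             scenes.append(current)
--         else:
--             # continuation of previous
--             if current:
--                 current["text"] += " " + line
--             else:
--                 # assign to NARRATOR by default
--                 current = {"character": "NARRATOR", "text": line}
--                 scenes.append(current)
--     return scenes
-- ===== SOURCE B (Python) =====
-- def parse_script_with_characters(script: str):
--     # Staged pipeline: strip lines, split into blank-separated paragraphs,
--     # then carve each paragraph into scenes by scanning for header lines.
--     lines = [raw.strip() for raw in script.splitlines()]
--     paragraphs = []
--     cur = []
--     for line in lines:
--         if line:
--             cur.append(line)
--         elif cur:
--             paragraphs.append(cur)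
--             cur = []
--     if cur:
--         paragraphs.append(cur)
--     scenes = []
--     for para in paragraphs:
--         # leading lines without ':' form one NARRATOR scene
--         i = 0
--         while i < len(para) and ":" not in para[i]:
--             i += 1
--         if i > 0:
--             scenes.append({"character": "NARRATOR", "text": " ".join(para[:i])})
--         # each remaining header line plus its continuation run is one scene
--         while i < len(para):
--             name, text = para[i].split(":", 1)
--             j = i + 1
--             while j < len(para) and ":" not in para[j]:
--                 j += 1
--             scenes.append({"character": name.strip().upper(),
--                            "text": " ".join([text.strip()] + para[i + 1:j])})
--             i = j
--     return scenes
-- ===== Notes on version B (the rewrite author's own statement) =====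
-- stated objective: alternative
-- what changed: B replaces A's single stateful pass (a 'current' dict mutated in place) by a staged pipeline: strip lines, split them into blank-separated paragraphs, then carve each paragraph into scenes by scanning for header lines and slicing out each header's continuation run, joining the parts once per scene.
import Mathlib
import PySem

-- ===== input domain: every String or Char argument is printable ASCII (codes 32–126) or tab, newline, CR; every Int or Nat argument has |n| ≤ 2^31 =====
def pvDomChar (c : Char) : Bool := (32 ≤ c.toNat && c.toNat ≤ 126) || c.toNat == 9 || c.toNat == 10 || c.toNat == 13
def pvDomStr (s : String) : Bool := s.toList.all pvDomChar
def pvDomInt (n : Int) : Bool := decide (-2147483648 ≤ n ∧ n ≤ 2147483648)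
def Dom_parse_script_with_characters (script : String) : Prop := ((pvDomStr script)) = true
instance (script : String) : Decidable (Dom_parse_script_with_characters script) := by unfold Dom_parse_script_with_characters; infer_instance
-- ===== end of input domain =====

-- B replaces A's single stateful pass (mutating a 'current' dict) by a staged pipeline:
-- strip, split into blank-separated paragraphs, carve each paragraph into scenes at header lines.

-- ===== PORT A =====
-- Python str '+' (exact: concatenation of code points)
def pvStrAdd (a b : String) : String := String.ofList (a.toList ++ b.toList)

-- d["text"] += extra on the association-list dict (value overwritten in place)
def pvDictAddText (d : List (String × String)) (extra : String) : List (String × String) :=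
  d.map (fun kv => if kv.1 = "text" then (kv.1, pvStrAdd kv.2 extra) else kv)

-- Python's `current` aliases the dict last appended to `scenes`, so a mutation through
-- `current` is an update of scenes' LAST element
def pvModifyLast {α : Type} (f : α → α) : List α → List α
  | [] => []
  | [x] => [f x]
  | x :: y :: xs => x :: pvModifyLast f (y :: xs)

-- loop body of A over state (scenes, current-is-open)
def pvAStep (st : List (List (String × String)) × Bool) (raw : String) :
    List (List (String × String)) × Bool :=
  let line := PySem.Str.strip raw
  if line = "" then (st.1, false)
  else if PySem.Str.isIn ":" line then
    let parts := (PySem.Str.splitMax? line ":" 1).getD []   -- ":" ∈ line, so two parts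
    let name := PySem.Str.upper (PySem.Str.strip (parts.getD 0 ""))
    let text := PySem.Str.strip (parts.getD 1 "")
    (st.1 ++ [[("character", name), ("text", text)]], true)
  else if st.2 then
    (pvModifyLast (fun d => pvDictAddText d (pvStrAdd " " line)) st.1, true)
  else
    (st.1 ++ [[("character", "NARRATOR"), ("text", line)]], true)

def parse_script_with_characters (script : String) : List (List (String × String)) :=
  ((PySem.Str.splitlines script).foldl pvAStep ([], false)).1

-- ===== PORT B =====
def pvNoColon (l : String) : Bool := !(PySem.Str.isIn ":" l)

-- the `while i/j < len(para) and ':' not in para[i/j]` scans: split at the first header line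
def pvSpan : List String → List String × List String
  | [] => ([], [])
  | l :: t => if pvNoColon l then (l :: (pvSpan t).1, (pvSpan t).2) else ([], l :: t)

theorem pvSpan_snd_le : ∀ (l : List String), ((pvSpan l).2).length ≤ l.length := by
  intro l
  induction l with
  | nil => simp [pvSpan]
  | cons a t ih =>
    simp only [pvSpan]
    split_ifs
    · exact Nat.le_succ_of_le ih
    · simp

def pvScene (name text : String) : List (String × String) :=
  [("character", name), ("text", text)]

-- the `while i < len(para)` loop: one scene per header line plus its continuation run
def pvHeaders : List String → List (List (String × String))
  | [] => []
  | h :: t =>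
    pvScene (PySem.Str.upper (PySem.Str.strip ((((PySem.Str.splitMax? h ":" 1).getD [])).getD 0 "")))
        (PySem.Str.join " " (PySem.Str.strip ((((PySem.Str.splitMax? h ":" 1).getD [])).getD 1 "") :: (pvSpan t).1))
      :: pvHeaders (pvSpan t).2
  termination_by l => l.length
  decreasing_by simpa using Nat.lt_succ_of_le (pvSpan_snd_le t)

-- fold body of the paragraph-splitting loop: state (paragraphs, current paragraph)
def pvParaStep (st : List (List String) × List String) (l : String) :
    List (List String) × List String :=
  if l ≠ "" then (st.1, st.2 ++ [l])
  else if st.2 ≠ [] then (st.1 ++ [st.2], [])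
  else st

def pvParagraphs (lines : List String) : List (List String) :=
  let st := lines.foldl pvParaStep ([], [])
  if st.2 ≠ [] then st.1 ++ [st.2] else st.1

-- one paragraph: a NARRATOR scene from the leading colon-free lines, then header scenes
def pvPara (para : List String) : List (List (String × String)) :=
  (if (pvSpan para).1 ≠ [] then [pvScene "NARRATOR" (PySem.Str.join " " (pvSpan para).1)] else [])
    ++ pvHeaders (pvSpan para).2

def parse_script_with_characters_alt (script : String) : List (List (String × String)) :=
  ((pvParagraphs ((PySem.Str.splitlines script).map PySem.Str.strip)).map pvPara).flatten

-- ===== PRECONDITION & SPEC =====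
def Spec_parse_script_with_characters (script : String) (out : List (List (String × String))) : Prop := out = parse_script_with_characters_alt script
instance (script : String) (out : List (List (String × String))) : Decidable (Spec_parse_script_with_characters script out) := by unfold Spec_parse_script_with_characters; infer_instance

-- ===== CLAIM (what is proved, stated in full; the proofs are below) =====
def Claim_equal_parse_script_with_characters : Prop := ∀ (script : String), Dom_parse_script_with_characters script → Spec_parse_script_with_characters script (parse_script_with_characters script)

-- ===== LEMMAS AND PROOFS =====

-- reference semantics: blocks (name, parts) produced by a one-line step function
def pvEmit : Option (String × List String) → List (String × List String)
  | none => []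
  | some b => [b]

def pvRS (st : List (String × List String) × Option (String × List String)) (l : String) :
    List (String × List String) × Option (String × List String) :=
  if l = "" then (st.1 ++ pvEmit st.2, none)
  else if PySem.Str.isIn ":" l then
    (st.1 ++ pvEmit st.2,
     some (PySem.Str.upper (PySem.Str.strip ((((PySem.Str.splitMax? l ":" 1).getD [])).getD 0 "")),
           [PySem.Str.strip ((((PySem.Str.splitMax? l ":" 1).getD [])).getD 1 "")]))
  else match st.2 with
    | some b => (st.1, some (b.1, b.2 ++ [l]))
    | none => (st.1, some ("NARRATOR", [l]))

def pvBlocks (ls : List String) (cur : Option (String × List String)) :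
    List (String × List String) :=
  let st := ls.foldl pvRS ([], cur)
  st.1 ++ pvEmit st.2

def pvRender (b : String × List String) : List (String × String) :=
  pvScene b.1 (PySem.Str.join " " b.2)

-- recursive characterization of the paragraph-splitting fold
def pvPgo (cur : List String) : List String → List (List String)
  | [] => if cur ≠ [] then [cur] else []
  | l :: ls => if l ≠ "" then pvPgo (cur ++ [l]) ls
               else if cur ≠ [] then cur :: pvPgo [] ls else pvPgo [] ls

-- joining one more part appends a separator and the part (Chars level)
theorem pv_join_snoc (sep x : List Char) : ∀ (rest : List (List Char)) (a : List Char),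
    PySem.Chars.join sep ((a :: rest) ++ [x]) = PySem.Chars.join sep (a :: rest) ++ sep ++ x := by
  intro rest
  induction rest with
  | nil => intro a; simp [PySem.Chars.join_cons_cons, PySem.Chars.join_singleton]
  | cons b r ih =>
    intro a
    simp only [List.cons_append, PySem.Chars.join_cons_cons]
    have := ih b
    simp only [List.cons_append] at this
    rw [this]
    simp [List.append_assoc]

theorem pv_join_single (t : String) : PySem.Str.join " " [t] = t := by
  simp [PySem.Str.join]

-- the String-level form A's `text += " " + line` produces
theorem pv_joinStr_snoc (p : String) (ps : List String) (x : String) :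
    PySem.Str.join " " ((p :: ps) ++ [x]) =
      pvStrAdd (PySem.Str.join " " (p :: ps)) (pvStrAdd " " x) := by
  apply String.toList_inj.mp
  simp [PySem.Str.join, pvStrAdd]
  have := pv_join_snoc " ".toList x.toList (ps.map String.toList) p.toList
  simpa [List.append_assoc] using this

-- mutating the "text" slot of a rendered block = rendering the block with one more part
theorem pv_dictAddText_render (b : String × List String) (hb : b.2 ≠ []) (line : String) :
    pvDictAddText (pvRender b) (pvStrAdd " " line) = pvRender (b.1, b.2 ++ [line]) := by
  obtain ⟨n, ps⟩ := b
  cases ps with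
  | nil => simp at hb
  | cons p rest =>
    simp [pvDictAddText, pvRender, pvScene]
    rw [← List.cons_append, pv_joinStr_snoc]

theorem pvModifyLast_append {α : Type} (f : α → α) :
    ∀ (xs : List α) (x : α), pvModifyLast f (xs ++ [x]) = xs ++ [f x] := by
  intro xs
  induction xs with
  | nil => intro x; simp [pvModifyLast]
  | cons a t ih =>
    intro x
    cases t with
    | nil => simp [pvModifyLast]
    | cons b r => simpa [pvModifyLast] using ih x

-- pvRS only ever appends to the first component
theorem pvRS_shift : ∀ (ls : List String)
    (st : List (String × List String) × Option (String × List String)),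
    ls.foldl pvRS st = (st.1 ++ (ls.foldl pvRS ([], st.2)).1, (ls.foldl pvRS ([], st.2)).2) := by
  intro ls
  induction ls with
  | nil => intro st; simp
  | cons l t ih =>
    intro st
    have hstep : pvRS st l = (st.1 ++ (pvRS ([], st.2) l).1, (pvRS ([], st.2) l).2) := by
      obtain ⟨d, c⟩ := st
      cases c <;> unfold pvRS <;> split_ifs <;> simp [pvEmit]
    simp only [List.foldl_cons, hstep]
    rw [ih (st.1 ++ (pvRS ([], st.2) l).1, (pvRS ([], st.2) l).2),
        ih (pvRS ([], st.2) l)]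
    simp [List.append_assoc]

theorem pvBlocks_cons (l : String) (ls : List String)
    (cur : Option (String × List String)) :
    pvBlocks (l :: ls) cur = (pvRS ([], cur) l).1 ++ pvBlocks ls (pvRS ([], cur) l).2 := by
  unfold pvBlocks
  rw [List.foldl_cons, pvRS_shift]
  simp [List.append_assoc]

-- one step of A's loop simulates one step of the reference machine
theorem pv_step (raw : String) (done : List (String × List String))
    (cur : Option (String × List String)) (h : ∀ b, cur = some b → b.2 ≠ []) :
    pvAStep ((done ++ pvEmit cur).map pvRender, cur.isSome) raw
      = ((done ++ (pvRS ([], cur) (PySem.Str.strip raw)).1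
            ++ pvEmit (pvRS ([], cur) (PySem.Str.strip raw)).2).map pvRender,
         ((pvRS ([], cur) (PySem.Str.strip raw)).2).isSome) := by
  by_cases h1 : PySem.Str.strip raw = ""
  · have hR : pvRS ([], cur) (PySem.Str.strip raw) = (pvEmit cur, none) := by
      unfold pvRS; rw [if_pos h1]; simp
    rw [hR]
    simp only [pvAStep]
    rw [if_pos h1]
    simp [pvEmit]
  · by_cases h2 : PySem.Str.isIn ":" (PySem.Str.strip raw) = true
    · have hR : pvRS ([], cur) (PySem.Str.strip raw) = (pvEmit cur,
          some (PySem.Str.upper (PySem.Str.strip ((((PySem.Str.splitMax? (PySem.Str.strip raw) ":" 1).getD [])).getD 0 "")),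
                [PySem.Str.strip ((((PySem.Str.splitMax? (PySem.Str.strip raw) ":" 1).getD [])).getD 1 "")])) := by
        unfold pvRS; rw [if_neg h1, if_pos h2]; simp
      rw [hR]
      simp only [pvAStep]
      rw [if_neg h1, if_pos h2]
      simp [pvEmit, pvRender, pvScene, pv_join_single, List.append_assoc]
    · cases cur with
      | some b =>
        have hR : pvRS ([], some b) (PySem.Str.strip raw)
            = ([], some (b.1, b.2 ++ [PySem.Str.strip raw])) := by
          unfold pvRS; rw [if_neg h1, if_neg h2]
        rw [hR]
        simp only [pvAStep]
        rw [if_neg h1, if_neg h2]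
        simp only [Option.isSome_some, if_true, pvEmit, List.map_append, List.map_cons,
          List.map_nil, List.append_nil]
        rw [pvModifyLast_append]
        simp [pv_dictAddText_render b (h b rfl)]
      | none =>
        have hR : pvRS ([], none) (PySem.Str.strip raw)
            = ([], some ("NARRATOR", [PySem.Str.strip raw])) := by
          unfold pvRS; rw [if_neg h1, if_neg h2]
        rw [hR]
        simp only [pvAStep]
        rw [if_neg h1, if_neg h2]
        simp [pvEmit, pvRender, pvScene, pv_join_single]

-- the reference step preserves "the open block has a nonempty parts list"
theorem pv_stepinv (l : String) (cur : Option (String × List String))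
    (h : ∀ b, cur = some b → b.2 ≠ []) :
    ∀ b', (pvRS ([], cur) l).2 = some b' → b'.2 ≠ [] := by
  intro b' hb'
  cases cur with
  | none =>
    unfold pvRS at hb'
    split_ifs at hb' <;> simp_all <;> simp [← hb']
  | some b =>
    have hbne := h b rfl
    unfold pvRS at hb'
    split_ifs at hb' <;> simp_all <;> simp [← hb']

-- A's loop in terms of the reference step: scenes = rendered (done ++ current)
theorem pv_a_loop : ∀ (raws : List String) (done : List (String × List String))
    (cur : Option (String × List String)),
    (∀ b, cur = some b → b.2 ≠ []) →
    (raws.foldl pvAStep ((done ++ pvEmit cur).map pvRender, cur.isSome)).1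
      = (pvBlocks (raws.map PySem.Str.strip) cur |> fun bs => done ++ bs).map pvRender := by
  intro raws
  induction raws with
  | nil =>
    intro done cur h
    simp [pvBlocks]
  | cons raw t ih =>
    intro done cur h
    simp only [List.foldl_cons, List.map_cons, pvBlocks_cons]
    rw [pv_step raw done cur h,
        ih (done ++ (pvRS ([], cur) (PySem.Str.strip raw)).1)
           ((pvRS ([], cur) (PySem.Str.strip raw)).2)
           (pv_stepinv (PySem.Str.strip raw) cur h)]
    simp [List.append_assoc]

-- per paragraph, from an open block (n, ps): the reference blocks are the block completed
-- with the continuation run, then the header scenes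
theorem pv_hdr : ∀ (q : List String), (∀ l ∈ q, l ≠ "") → ∀ (n : String) (ps : List String),
    (pvBlocks q (some (n, ps))).map pvRender
      = pvRender (n, ps ++ (pvSpan q).1) :: pvHeaders (pvSpan q).2 := by
  intro q
  induction q with
  | nil => intro _ n ps; simp [pvBlocks, pvEmit, pvSpan, pvHeaders]
  | cons l t ih =>
    intro hq n ps
    have hl : l ≠ "" := hq l (by simp)
    have ht : ∀ x ∈ t, x ≠ "" := fun x hx => hq x (by simp [hx])
    by_cases hc : PySem.Str.isIn ":" l = true
    · rw [pvBlocks_cons]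
      have hR : pvRS ([], some (n, ps)) l = ([(n, ps)],
          some (PySem.Str.upper (PySem.Str.strip ((((PySem.Str.splitMax? l ":" 1).getD [])).getD 0 "")),
                [PySem.Str.strip ((((PySem.Str.splitMax? l ":" 1).getD [])).getD 1 "")])) := by
        unfold pvRS
        rw [if_neg hl, if_pos hc]
        simp [pvEmit]
      rw [hR]
      simp only [List.map_cons, List.cons_append, List.nil_append]
      rw [ih ht]
      have hnc : pvNoColon l = false := by unfold pvNoColon; rw [hc]; rfl
      have hsp : pvSpan (l :: t) = ([], l :: t) := by
        simp only [pvSpan, hnc]; simp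
      simp [hsp, pvHeaders, pvRender, pvScene]
    · rw [pvBlocks_cons]
      have hR : pvRS ([], some (n, ps)) l = ([], some (n, ps ++ [l])) := by
        unfold pvRS
        rw [if_neg hl, if_neg hc]
      rw [hR]
      simp only [List.nil_append]
      rw [ih ht]
      have hnc : pvNoColon l = true := by
        unfold pvNoColon
        rw [eq_false_of_ne_true hc]
        rfl
      have hsp : pvSpan (l :: t) = (l :: (pvSpan t).1, (pvSpan t).2) := by
        simp only [pvSpan, hnc]; simp
      simp [hsp]

-- per blank-free paragraph: reference blocks rendered = pvPara
theorem pv_lead : ∀ (p : List String), (∀ l ∈ p, l ≠ "") →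
    (pvBlocks p none).map pvRender = pvPara p := by
  intro p hp
  cases p with
  | nil => simp [pvBlocks, pvEmit, pvPara, pvSpan, pvHeaders]
  | cons l t =>
    have hl : l ≠ "" := hp l (by simp)
    have ht : ∀ x ∈ t, x ≠ "" := fun x hx => hp x (by simp [hx])
    rw [pvBlocks_cons]
    by_cases hc : PySem.Str.isIn ":" l = true
    · have hR : pvRS ([], none) l = ([],
          some (PySem.Str.upper (PySem.Str.strip ((((PySem.Str.splitMax? l ":" 1).getD [])).getD 0 "")),
                [PySem.Str.strip ((((PySem.Str.splitMax? l ":" 1).getD [])).getD 1 "")])) := by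
        unfold pvRS
        rw [if_neg hl, if_pos hc]
        simp [pvEmit]
      rw [hR]
      simp only [List.nil_append]
      rw [pv_hdr t ht]
      have hnc : pvNoColon l = false := by unfold pvNoColon; rw [hc]; rfl
      have hsp : pvSpan (l :: t) = ([], l :: t) := by
        simp only [pvSpan, hnc]; simp
      simp [pvPara, hsp, pvHeaders, pvRender, pvScene]
    · have hR : pvRS ([], none) l = ([], some ("NARRATOR", [l])) := by
        unfold pvRS
        rw [if_neg hl, if_neg hc]
      rw [hR]
      simp only [List.nil_append]
      rw [pv_hdr t ht]
      have hnc : pvNoColon l = true := by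
        unfold pvNoColon; rw [eq_false_of_ne_true hc]; rfl
      have hsp : pvSpan (l :: t) = (l :: (pvSpan t).1, (pvSpan t).2) := by
        simp only [pvSpan, hnc]; simp
      simp [pvPara, hsp, pvRender, pvScene]

-- the paragraph fold is pvPgo
theorem pv_parafold : ∀ (ls : List String) (ps : List (List String)) (cur : List String),
    (let st := ls.foldl pvParaStep (ps, cur);
     if st.2 ≠ [] then st.1 ++ [st.2] else st.1) = ps ++ pvPgo cur ls := by
  intro ls
  induction ls with
  | nil =>
    intro ps cur
    simp only [List.foldl_nil, pvPgo]
    split_ifs <;> simp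
  | cons l t ih =>
    intro ps cur
    simp only [List.foldl_cons, pvPgo]
    by_cases hl : l = ""
    · by_cases hc : cur = []
      · simp [pvParaStep, hl, hc, ih ps []]
      · simp [pvParaStep, hl, hc, ih (ps ++ [cur]) []]
    · simp [pvParaStep, hl, ih ps (cur ++ [l])]

-- gluing: the paragraphs of the remaining lines, carved by pvPara, are the reference blocks
theorem pv_glue : ∀ (ls cur : List String), (∀ l ∈ cur, l ≠ "") →
    ((pvPgo cur ls).map pvPara).flatten = (pvBlocks (cur ++ ls) none).map pvRender := by
  intro ls
  induction ls with
  | nil =>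
    intro cur hcur
    rw [List.append_nil, pv_lead cur hcur]
    simp only [pvPgo]
    split_ifs with hc
    · simp
    · simp only [ne_eq, not_not] at hc
      subst hc
      simp [pvPara, pvSpan, pvHeaders]
  | cons l t ih =>
    intro cur hcur
    by_cases hl : l = ""
    · subst hl
      have hsplit : pvBlocks (cur ++ "" :: t) none = pvBlocks cur none ++ pvBlocks t none := by
        unfold pvBlocks
        rw [List.foldl_append, List.foldl_cons]
        have h1 : pvRS (cur.foldl pvRS ([], none)) "" =
            ((cur.foldl pvRS ([], none)).1 ++ pvEmit (cur.foldl pvRS ([], none)).2, none) := by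
          unfold pvRS; simp
        rw [h1, pvRS_shift]
        simp [List.append_assoc]
      have hI := ih [] (by simp)
      simp only [List.nil_append] at hI
      rw [hsplit, List.map_append, pv_lead cur hcur, ← hI]
      by_cases hc : cur = []
      · subst hc
        simp [pvPgo, pvPara, pvSpan, pvHeaders]
      · simp [pvPgo, hc]
    · have hI := ih (cur ++ [l]) (by
        intro x hx
        rcases List.mem_append.mp hx with h | h
        · exact hcur x h
        · simp at h; subst h; exact hl)
      rw [show cur ++ l :: t = (cur ++ [l]) ++ t by simp, ← hI]
      simp only [pvPgo]
      rw [if_pos hl]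

-- ===== VERDICT (by name: the statement is the Claim_ definition above) =====
theorem parse_script_with_characters_spec : Claim_equal_parse_script_with_characters := by
  intro script _
  unfold Spec_parse_script_with_characters parse_script_with_characters parse_script_with_characters_alt
  have hA := pv_a_loop (PySem.Str.splitlines script) [] none (by intro b h; cases h)
  simp only [pvEmit, List.append_nil, List.map_nil, Option.isSome_none] at hA
  rw [hA]
  rw [pvParagraphs, pv_parafold _ [] []]
  have hG := pv_glue ((PySem.Str.splitlines script).map PySem.Str.strip) [] (by simp)
  simp only [List.nil_append] at hG ⊢
  rw [hG]
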